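-- pv_equiv track=rewrite | github.com/Crswd38/algorithm | 프로그래머스/0/120834. 외계행성의 나이/외계행성의 나이.py | solution
-- ===== SOURCE A (Python) =====
-- def solution(age):
--     result = []
--     age = str(age)
--     l = {'0':'a', '1':'b', '2':'c', '3':'d', '4':'e', '5':'f', '6':'g', '7':'h', '8':'i', '9':'j'}
--     for k in range(len(age)):
--         for n, m in l.items():
--             if age[k] == n:
--                 result.append(m)
--     return ''.join(result)
-- ===== SOURCE B (Python) =====
-- def solution(age):
--     return ''.join(chr(ord('a') + int(c)) for c in str(age))
-- ===== Notes on version B (the rewrite author's own statement) =====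
-- stated objective: idiomatic
-- what changed: Replaces the per-digit inner scan over a fixed dict's items with a single comprehension that computes each letter directly by character arithmetic from the digit value.
-- outside the precondition, e.g. on solution(-25): A returns 'cf', B raises ValueError
import Mathlib
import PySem

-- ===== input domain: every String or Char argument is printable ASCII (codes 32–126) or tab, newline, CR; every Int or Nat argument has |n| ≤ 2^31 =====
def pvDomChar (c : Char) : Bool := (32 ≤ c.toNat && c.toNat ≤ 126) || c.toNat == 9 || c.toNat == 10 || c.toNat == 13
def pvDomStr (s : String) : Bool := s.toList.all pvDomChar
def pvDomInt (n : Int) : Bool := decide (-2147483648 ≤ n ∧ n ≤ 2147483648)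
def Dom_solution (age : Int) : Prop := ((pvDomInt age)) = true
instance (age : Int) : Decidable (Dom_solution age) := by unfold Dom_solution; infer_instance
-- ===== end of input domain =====

-- B replaces A's per-digit scan over a 10-entry dict with character arithmetic chr(ord('a')+int(c)) in one pass (idiomatic).

-- ===== PORT A =====
-- the dict literal l = {'0':'a', …, '9':'j'} (1-char Python strings ported as Char)
def solutionDict : PySem.Dict Char Char :=
  PySem.Dict.ofList [('0','a'), ('1','b'), ('2','c'), ('3','d'), ('4','e'),
                     ('5','f'), ('6','g'), ('7','h'), ('8','i'), ('9','j')]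

def solution (age : Int) : String :=
  let result : List Char := []
  let ageS : List Char := (PySem.Int.toStr age).toList
  let result :=
    (PySem.List.pyRange 0 (PySem.List.len ageS)).foldl (fun result k =>
      solutionDict.items.foldl (fun result nm =>
        if PySem.List.pyGetD ageS k ' ' == nm.1 then result ++ [nm.2] else result) result) result
  String.ofList result  -- ''.join(result)

-- ===== PORT B =====
def solution_alt (age : Int) : String :=
  -- ''.join(chr(ord('a') + int(c)) for c in str(age)); int(c) = ofChars? [c] (always a digit under Pre_)
  String.ofList ((PySem.Int.toStr age).toList.map
    (fun c => Char.ofNat ('a'.toNat + ((PySem.Int.ofChars? [c]).getD 0).toNat)))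

-- ===== PRECONDITION & SPEC =====
-- Pre_ excludes negative ages: str(age) then carries a '-', which A's dict scan silently drops
-- (an artefact; A returns e.g. 'cf' for -25) while B's int('-') raises ValueError.
def Pre_solution (age : Int) : Prop := 0 ≤ age
instance (age : Int) : Decidable (Pre_solution age) := by unfold Pre_solution; infer_instance
def pvWitness_solution : Int := (25)
def Spec_solution (age : Int) (out : String) : Prop := out = solution_alt age
instance (age : Int) (out : String) : Decidable (Spec_solution age out) := by unfold Spec_solution; infer_instance

-- ===== CLAIM (what is proved, stated in full; the proofs are below) =====
def Claim_equal_solution : Prop := ∀ (age : Int), Dom_solution age → Pre_solution age → Spec_solution age (solution age)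

-- ===== LEMMAS AND PROOFS =====

def pvDigits : List Char := ['0','1','2','3','4','5','6','7','8','9']

lemma pv_toDigitsCore_mem (fuel : Nat) : ∀ (n : Nat) (acc : List Char),
    ∀ c ∈ Nat.toDigitsCore 10 fuel n acc, c ∈ acc ∨ c ∈ pvDigits := by
  induction fuel with
  | zero => intro n acc c hc; exact Or.inl hc
  | succ fuel ih =>
    intro n acc c hc
    have hd : (n % 10).digitChar ∈ pvDigits := by
      have h10 : n % 10 < 10 := Nat.mod_lt _ (by norm_num)
      interval_cases h : n % 10 <;> simp [Nat.digitChar, pvDigits]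
    rw [Nat.toDigitsCore] at hc
    split at hc
    · rcases List.mem_cons.mp hc with h | h
      · exact Or.inr (h ▸ hd)
      · exact Or.inl h
    · rcases ih _ _ c hc with h | h
      · rcases List.mem_cons.mp h with h' | h'
        · exact Or.inr (h' ▸ hd)
        · exact Or.inl h'
      · exact Or.inr h

lemma pv_toChars_digits (age : Int) (h : 0 ≤ age) :
    ∀ c ∈ (PySem.Int.toStr age).toList, c ∈ pvDigits := by
  intro c hc
  rw [PySem.Int.toList_toStr, PySem.Int.toChars, if_neg (by omega)] at hc
  rcases pv_toDigitsCore_mem _ _ _ c hc with h | h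
  · simp at h
  · exact h

-- on a digit char, A's inner dict scan appends exactly B's letter
lemma pv_inner (c : Char) (hc : c ∈ pvDigits) (r : List Char) :
    solutionDict.items.foldl (fun result nm =>
      if c == nm.1 then result ++ [nm.2] else result) r
    = r ++ [Char.ofNat ('a'.toNat + ((PySem.Int.ofChars? [c]).getD 0).toNat)] := by
  fin_cases hc <;> rfl

lemma pv_fold (cs : List Char) (hcs : ∀ c ∈ cs, c ∈ pvDigits) (r : List Char) :
    cs.foldl (fun result c => solutionDict.items.foldl (fun result nm =>
      if c == nm.1 then result ++ [nm.2] else result) result) r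
    = r ++ cs.map (fun c => Char.ofNat ('a'.toNat + ((PySem.Int.ofChars? [c]).getD 0).toNat)) := by
  induction cs generalizing r with
  | nil => simp
  | cons x xs ih =>
    simp only [List.foldl_cons, List.map_cons]
    rw [pv_inner x (hcs x (List.mem_cons_self)) r,
        ih (fun c hc => hcs c (List.mem_cons_of_mem _ hc)), List.append_assoc]
    rfl

theorem pv_equal (age : Int) (h : 0 ≤ age) : solution age = solution_alt age := by
  dsimp only [solution, solution_alt]
  rw [PySem.List.foldl_pyRange_zero_pyGetD ((PySem.Int.toStr age).toList) ' '
      (fun result c => solutionDict.items.foldl (fun result nm =>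
        if c == nm.1 then result ++ [nm.2] else result) result) []]
  rw [pv_fold _ (pv_toChars_digits age h), List.nil_append]

-- ===== VERDICT (by name: the statement is the Claim_ definition above) =====
theorem solution_spec : Claim_equal_solution := by
  intro age _ hpre
  unfold Spec_solution
  exact pv_equal age hpre
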